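-- pv_equiv track=rewrite | github.com/ravimn/leetcode-solutions | solutions/isValidSudoku.py | isValidSudokuList
-- ===== SOURCE A (Python) =====
-- def isValidSudokuList(nums:list[str]) -> bool:
--     numsMap = {}
--     for i in nums:
--         if i == ".":
--             continue
--         if i in numsMap:
--             return False
--         numsMap[i] = 1
--     return True
-- ===== SOURCE B (Python) =====
-- def isValidSudokuList(nums: list[str]) -> bool:
--     s = sorted(x for x in nums if x != ".")
--     return all(a != b for a, b in zip(s, s[1:]))
-- ===== Notes on version B (the rewrite author's own statement) =====
-- stated objective: alternative
-- what changed: Replaces the hash-dict membership loop with a sort-then-adjacent-scan: sort the non-dot entries and check that no two neighbours are equal (duplicates are adjacent in sorted order).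
import Mathlib
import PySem

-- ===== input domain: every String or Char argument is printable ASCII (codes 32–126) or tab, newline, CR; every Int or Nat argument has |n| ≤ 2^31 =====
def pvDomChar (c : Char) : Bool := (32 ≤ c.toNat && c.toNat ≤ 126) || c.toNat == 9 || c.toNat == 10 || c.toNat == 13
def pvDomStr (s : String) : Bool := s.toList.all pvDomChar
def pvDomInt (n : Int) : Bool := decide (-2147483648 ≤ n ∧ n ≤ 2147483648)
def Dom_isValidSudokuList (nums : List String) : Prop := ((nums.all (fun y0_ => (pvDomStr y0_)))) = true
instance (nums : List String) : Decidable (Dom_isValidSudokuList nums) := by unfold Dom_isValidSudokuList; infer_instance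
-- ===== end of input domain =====

-- B replaces A's early-return dict-membership loop by sorting the non-dot entries and
-- scanning for equal adjacent neighbours (a different algorithm; similar practical cost).


-- ===== PORT A =====
-- loop over nums carrying numsMap; the early 'return False' becomes returning false
def isValidSudokuListLoop : List String → PySem.Dict String Int → Bool
  | [], _ => true
  | i :: rest, numsMap =>
    if i = "." then isValidSudokuListLoop rest numsMap
    else if numsMap.contains i then false
    else isValidSudokuListLoop rest (numsMap.insert i 1)

def isValidSudokuList (nums : List String) : Bool :=
  isValidSudokuListLoop nums PySem.Dict.empty

-- ===== PORT B =====
-- all(a != b for a, b in zip(s, s[1:])): adjacent-pair scan of the sorted list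
def pvNoAdjDup : List String → Bool
  | a :: b :: rest => a != b && pvNoAdjDup (b :: rest)
  | _ => true

def isValidSudokuList_alt (nums : List String) : Bool :=
  let s := PySem.List.sorted (nums.filter (fun x => x ≠ ".")) (fun x => x) false
  pvNoAdjDup s

-- ===== PRECONDITION & SPEC =====
def Spec_isValidSudokuList (nums : List String) (out : Bool) : Prop := out = isValidSudokuList_alt nums
instance (nums : List String) (out : Bool) : Decidable (Spec_isValidSudokuList nums out) := by unfold Spec_isValidSudokuList; infer_instance

-- ===== CLAIM (what is proved, stated in full; the proofs are below) =====
def Claim_equal_isValidSudokuList : Prop := ∀ (nums : List String), Dom_isValidSudokuList nums → Spec_isValidSudokuList nums (isValidSudokuList nums)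

-- ===== LEMMAS AND PROOFS =====

-- A's loop decides: the non-dot entries are pairwise distinct and none is already a key of numsMap.
theorem loopA_characterization (nums : List String) :
    ∀ (m : PySem.Dict String Int),
      isValidSudokuListLoop nums m =
        decide ((nums.filter (fun x => x ≠ ".")).Nodup ∧
                ∀ x ∈ nums.filter (fun x => x ≠ "."), m.contains x = false) := by
  induction nums with
  | nil => intro m; simp [isValidSudokuListLoop]
  | cons i rest ih =>
    intro m
    by_cases hi : i = "."
    · simp [isValidSudokuListLoop, hi, ih]
    · have hfil : (i :: rest).filter (fun x => x ≠ ".") =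
          i :: rest.filter (fun x => x ≠ ".") := by simp [hi]
      by_cases hc : m.contains i
      · rw [isValidSudokuListLoop, if_neg hi, if_pos hc, hfil]
        have : ¬ (((i :: rest.filter (fun x => x ≠ ".")).Nodup) ∧
            ∀ x ∈ i :: rest.filter (fun x => x ≠ "."), m.contains x = false) := by
          rintro ⟨-, hall⟩
          have := hall i (List.mem_cons_self ..)
          rw [hc] at this; cases this
        exact (decide_eq_false this).symm
      · rw [isValidSudokuListLoop, if_neg hi, if_neg hc, ih, hfil, decide_eq_decide]
        simp only [List.nodup_cons, List.mem_cons, PySem.Dict.contains_insert]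
        constructor
        · rintro ⟨hn, hall⟩
          refine ⟨⟨fun hmem => ?_, hn⟩, ?_⟩
          · have := hall i hmem
            simp only [Bool.or_eq_false_iff, beq_eq_false_iff_ne, ne_eq] at this
            exact this.1 trivial
          · rintro x (rfl | hx)
            · exact Bool.eq_false_iff.mpr hc
            · have := hall x hx
              simp only [Bool.or_eq_false_iff, beq_eq_false_iff_ne, ne_eq] at this
              exact this.2
        · rintro ⟨⟨hni, hn⟩, hall⟩
          refine ⟨hn, fun x hx => ?_⟩
          have hne : x ≠ i := fun h => hni (h ▸ hx)
          simp [hne, hall x (Or.inr hx)]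

-- the adjacent-pair scan decides IsChain (· ≠ ·)
theorem pvNoAdjDup_eq_chain : ∀ (l : List String),
    pvNoAdjDup l = decide (l.IsChain (· ≠ ·))
  | [] => by simp [pvNoAdjDup]
  | [a] => by simp [pvNoAdjDup]
  | a :: b :: rest => by
    rw [pvNoAdjDup, pvNoAdjDup_eq_chain (b :: rest)]
    simp [List.isChain_cons_cons, bne, beq_eq_decide]

-- on a ≤-sorted list, adjacent distinctness is the same as Nodup
theorem chain_ne_iff_nodup_of_sorted (l : List String)
    (hs : l.Pairwise (fun a b => a ≤ b)) :
    l.IsChain (fun a b => a ≠ b) ↔ l.Nodup := by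
  constructor
  · intro hc
    have hlt : l.IsChain (fun a b : String => a < b) := by
      have hle : l.IsChain (fun a b : String => a ≤ b) := hs.isChain
      rw [List.isChain_iff_getElem] at hc hle ⊢
      intro i hi
      exact lt_of_le_of_ne (hle i hi) (hc i hi)
    exact (List.isChain_iff_pairwise.mp hlt).imp ne_of_lt
  · intro hn
    exact hn.isChain

-- B decides: the filtered list is Nodup.
theorem altB_characterization (nums : List String) :
    isValidSudokuList_alt nums = decide ((nums.filter (fun x => x ≠ ".")).Nodup) := by
  unfold isValidSudokuList_alt
  rw [pvNoAdjDup_eq_chain]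
  rw [decide_eq_decide]
  rw [chain_ne_iff_nodup_of_sorted _ (PySem.List.sorted_pairwise ..)]
  exact (PySem.List.sorted_perm ..).nodup_iff

-- ===== VERDICT (by name: the statement is the Claim_ definition above) =====
theorem isValidSudokuList_spec : Claim_equal_isValidSudokuList := by
  intro nums _
  unfold Spec_isValidSudokuList isValidSudokuList
  rw [loopA_characterization, altB_characterization]
  simp [PySem.Dict.contains_empty]
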